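-- pv_equiv track=rewrite | github.com/srochagomes/bolao_mega | backend/app/services/dozen_analyzer.py | get_dozen_for_number
-- ===== SOURCE A (Python) =====
-- def get_dozen_for_number(number: int) -> str:
--     """Get dozen key for a given number"""
--     # Find which dozen this number belongs to
--     dozens = [
--         (1, 10),    # Dozen 1: 1-10
--         (11, 20),   # Dozen 2: 11-20
--         (21, 30),   # Dozen 3: 21-30
--         (31, 40),   # Dozen 4: 31-40
--         (41, 50),   # Dozen 5: 41-50
--         (51, 60)    # Dozen 6: 51-60
--     ]
--
--     for start, end in dozens:
--         if start <= number <= end: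
--             return f"{start}-{end}"
--     return "1-10"  # Default fallback
-- ===== SOURCE B (Python) =====
-- def get_dozen_for_number(number: int) -> str:
--     """Get dozen key for a given number"""
--     if 1 <= number <= 60:
--         start = ((number - 1) // 10) * 10 + 1
--         return f"{start}-{start + 9}"
--     return "1-10"  # Default fallback
-- ===== Notes on version B (the rewrite author's own statement) =====
-- stated objective: simpler
-- what changed: Replaced the six-range list and scan loop with a closed-form integer-division formula computing the dozen's start directly.
import Mathlib
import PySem

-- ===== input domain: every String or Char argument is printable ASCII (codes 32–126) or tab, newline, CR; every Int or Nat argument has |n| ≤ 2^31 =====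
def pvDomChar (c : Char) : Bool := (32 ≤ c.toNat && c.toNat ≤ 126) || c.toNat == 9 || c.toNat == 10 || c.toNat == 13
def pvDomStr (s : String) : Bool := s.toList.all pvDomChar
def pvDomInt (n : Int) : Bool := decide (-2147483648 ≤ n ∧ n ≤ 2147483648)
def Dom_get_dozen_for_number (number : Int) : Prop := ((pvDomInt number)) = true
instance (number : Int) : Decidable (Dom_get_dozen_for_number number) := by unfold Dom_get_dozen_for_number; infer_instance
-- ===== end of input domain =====

-- B replaces A's list of six ranges and the scan loop with a closed-form division formula (simpler).

-- ===== PORT A =====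
-- the for-loop over the fixed list with early return, as structural recursion
def pvDozenLoop (number : Int) : List (Int × Int) → String
  | [] => "1-10"
  | (s, e) :: rest =>
      if s ≤ number ∧ number ≤ e then PySem.Int.toStr s ++ "-" ++ PySem.Int.toStr e
      else pvDozenLoop number rest

def get_dozen_for_number (number : Int) : String :=
  let dozens : List (Int × Int) := [(1,10),(11,20),(21,30),(31,40),(41,50),(51,60)]
  pvDozenLoop number dozens

-- ===== PORT B =====
def get_dozen_for_number_alt (number : Int) : String :=
  if 1 ≤ number ∧ number ≤ 60 then
    let start := PySem.Int.floordiv (number - 1) 10 * 10 + 1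
    PySem.Int.toStr start ++ "-" ++ PySem.Int.toStr (start + 9)
  else "1-10"

-- ===== PRECONDITION & SPEC =====
def Spec_get_dozen_for_number (number : Int) (out : String) : Prop := out = get_dozen_for_number_alt number
instance (number : Int) (out : String) : Decidable (Spec_get_dozen_for_number number out) := by unfold Spec_get_dozen_for_number; infer_instance

-- ===== CLAIM (what is proved, stated in full; the proofs are below) =====
def Claim_equal_get_dozen_for_number : Prop := ∀ (number : Int), Dom_get_dozen_for_number number → Spec_get_dozen_for_number number (get_dozen_for_number number)

-- ===== LEMMAS AND PROOFS =====

-- ===== VERDICT (by name: the statement is the Claim_ definition above) =====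
theorem get_dozen_for_number_spec : Claim_equal_get_dozen_for_number := by
  intro n _
  unfold Spec_get_dozen_for_number get_dozen_for_number get_dozen_for_number_alt
  by_cases h : 1 ≤ n ∧ n ≤ 60
  · obtain ⟨h1, h2⟩ := h
    interval_cases n <;> decide
  · simp only [pvDozenLoop]
    split_ifs with h1 h2 h3 h4 h5 h6 <;> first | rfl | omega
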